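-- pv_equiv track=rewrite | github.com/Octopupu5/tda_repr | tda_repr/training/monitor.py | _graph_betti_from_edges
-- ===== SOURCE A (Python) =====
-- from typing import Any, Dict, List, Optional, Tuple
--
-- def _graph_betti_from_edges(n_vertices: int, edges: List[Tuple[int, int]]) -> Tuple[int, int]:
-- 	"""
-- 	For an undirected graph with n vertices and edge list:
-- 	beta0 is the number of connected components.
-- 	beta1 is m - n + beta0.
-- 	"""
-- 	parent = list(range(n_vertices))
-- 	rank = [0] * n_vertices
--
-- 	def find(x: int) -> int:
-- 		while parent[x] != x:
-- 			parent[x] = parent[parent[x]]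
-- 			x = parent[x]
-- 		return x
--
-- 	def union(a: int, b: int) -> None:
-- 		ra, rb = find(a), find(b)
-- 		if ra == rb:
-- 			return
-- 		if rank[ra] < rank[rb]:
-- 			parent[ra] = rb
-- 		elif rank[ra] > rank[rb]:
-- 			parent[rb] = ra
-- 		else:
-- 			parent[rb] = ra
-- 			rank[ra] += 1
--
-- 	for a, b in edges:
-- 		union(a, b)
--
-- 	comps = len({find(i) for i in range(n_vertices)})
-- 	m = len(edges)
-- 	beta0 = comps
-- 	beta1 = m - n_vertices + comps
-- 	return beta0, beta1
-- ===== SOURCE B (Python) =====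
-- def _graph_betti_from_edges(n_vertices, edges):
--     """Label-propagation ("paint-bucket") variant: merge colour classes by relabelling."""
--     label = list(range(n_vertices))
--     for a, b in edges:
--         la, lb = label[a], label[b]
--         if la != lb:
--             label = [la if x == lb else x for x in label]
--     beta0 = len(set(label))
--     return beta0, len(edges) - n_vertices + beta0
-- ===== Notes on version B (the rewrite author's own statement) =====
-- stated objective: simpler
-- what changed: Replaces union-find with path compression and union-by-rank (mutable parent/rank trees, find loops, a final find-per-vertex set comprehension) by flat label propagation: a colour list where each merging edge rewrites one colour class, components = number of distinct colours.
import Mathlib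
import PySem

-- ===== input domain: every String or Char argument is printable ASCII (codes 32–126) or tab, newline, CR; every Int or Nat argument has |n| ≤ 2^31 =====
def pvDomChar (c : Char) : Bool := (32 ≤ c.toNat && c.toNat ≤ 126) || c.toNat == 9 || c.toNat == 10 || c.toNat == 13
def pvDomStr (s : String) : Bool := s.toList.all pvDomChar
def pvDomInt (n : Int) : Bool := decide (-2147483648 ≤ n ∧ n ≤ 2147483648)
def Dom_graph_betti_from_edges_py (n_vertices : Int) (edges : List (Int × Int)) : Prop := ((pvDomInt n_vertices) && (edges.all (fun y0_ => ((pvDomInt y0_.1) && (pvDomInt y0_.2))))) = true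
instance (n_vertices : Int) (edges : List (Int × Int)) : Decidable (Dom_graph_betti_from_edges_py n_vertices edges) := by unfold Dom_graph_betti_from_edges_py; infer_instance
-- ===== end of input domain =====

-- B replaces A's union-find (path compression + union by rank) by flat label
-- propagation (merge colour classes by relabelling a colour list); objective: simpler.

-- ===== PORT A =====
-- the nested `find` (while parent[x] != x: parent[x] = parent[parent[x]]; x = parent[x]);
-- fuel `parent.length + 1` suffices on every input admitted by Pre_ (proved below)
def pvFindA (fuel : Nat) (parent : List Int) (x : Int) : List Int × Int :=
  match fuel with
  | 0 => (parent, x)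
  | f+1 =>
    let px := PySem.List.pyGetD parent x 0
    if px = x then (parent, x)
    else
      let ppx := PySem.List.pyGetD parent px 0
      pvFindA f (PySem.List.pySetD parent x ppx) ppx

-- the nested `union`
def pvUnionA (parent rank : List Int) (a b : Int) : List Int × List Int :=
  let fa := pvFindA (parent.length + 1) parent a
  let fb := pvFindA (fa.1.length + 1) fa.1 b
  let p := fb.1
  let ra := fa.2
  let rb := fb.2
  if ra = rb then (p, rank)
  else if PySem.List.pyGetD rank ra 0 < PySem.List.pyGetD rank rb 0 then
    (PySem.List.pySetD p ra rb, rank)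
  else if PySem.List.pyGetD rank rb 0 < PySem.List.pyGetD rank ra 0 then
    (PySem.List.pySetD p rb ra, rank)
  else
    (PySem.List.pySetD p rb ra, PySem.List.pySetD rank ra (PySem.List.pyGetD rank ra 0 + 1))

def graph_betti_from_edges_py (n_vertices : Int) (edges : List (Int × Int)) : Int × Int :=
  let parent0 := PySem.List.pyRange 0 n_vertices 1
  let rank0 := PySem.List.pyRepeat [(0 : Int)] n_vertices
  let st := edges.foldl (fun st e => pvUnionA st.1 st.2 e.1 e.2) (parent0, rank0)
  -- comps = len({find(i) for i in range(n_vertices)})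
  let fin := (PySem.List.pyRange 0 n_vertices 1).foldl
      (fun (acc : List Int × PySem.Set Int) i =>
        let f := pvFindA (acc.1.length + 1) acc.1 i
        (f.1, PySem.Set.add acc.2 f.2)) (st.1, PySem.Set.empty)
  let comps : Int := PySem.Set.len fin.2
  (comps, PySem.List.len edges - n_vertices + comps)

-- ===== PORT B =====
def graph_betti_from_edges_py_alt (n_vertices : Int) (edges : List (Int × Int)) : Int × Int :=
  let label := edges.foldl (fun lab e =>
      let la := PySem.List.pyGetD lab e.1 0
      let lb := PySem.List.pyGetD lab e.2 0
      if la ≠ lb then lab.map (fun x => if x = lb then la else x) else lab)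
    (PySem.List.pyRange 0 n_vertices 1)
  let beta0 : Int := PySem.Set.len (PySem.Set.ofList label)
  (beta0, PySem.List.len edges - n_vertices + beta0)

-- ===== PRECONDITION & SPEC =====
-- Pre_ excludes exactly the inputs on which the Python A raises IndexError:
-- an edge endpoint outside [-n_vertices, n_vertices) (Python list indexing).
def Pre_graph_betti_from_edges_py (n_vertices : Int) (edges : List (Int × Int)) : Prop :=
  ∀ e ∈ edges, (-n_vertices ≤ e.1 ∧ e.1 < n_vertices) ∧ (-n_vertices ≤ e.2 ∧ e.2 < n_vertices)
instance (n_vertices : Int) (edges : List (Int × Int)) : Decidable (Pre_graph_betti_from_edges_py n_vertices edges) := by unfold Pre_graph_betti_from_edges_py; infer_instance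

def pvWitness_graph_betti_from_edges_py : Int × (List (Int × Int)) := (4, [(0, 1), (1, 2), (-4, 2)])

def Spec_graph_betti_from_edges_py (n_vertices : Int) (edges : List (Int × Int)) (out : Int × Int) : Prop := out = graph_betti_from_edges_py_alt n_vertices edges
instance (n_vertices : Int) (edges : List (Int × Int)) (out : Int × Int) : Decidable (Spec_graph_betti_from_edges_py n_vertices edges out) := by unfold Spec_graph_betti_from_edges_py; infer_instance

-- ===== CLAIM (what is proved, stated in full; the proofs are below) =====
def Claim_equal_graph_betti_from_edges_py : Prop := ∀ (n_vertices : Int) (edges : List (Int × Int)), Dom_graph_betti_from_edges_py n_vertices edges → Pre_graph_betti_from_edges_py n_vertices edges → Spec_graph_betti_from_edges_py n_vertices edges (graph_betti_from_edges_py n_vertices edges)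

-- ===== LEMMAS AND PROOFS =====

-- normalised (wrapped) index of x in a list of length N, exactly Python's rule
def pvIx (N : Nat) (x : Int) : Nat := if 0 ≤ x then x.toNat else N - (-x).toNat
-- one parent-pointer step
def pvStep (p : List Int) (k : Nat) : Nat := (p.getD k 0).toNat
-- root of k following parent pointers, with fuel
def pvRootF : Nat → List Int → Nat → Nat
  | 0, _, x => x
  | f+1, p, x => if pvStep p x = x then x else pvRootF f p (pvStep p x)
def pvRoot (p : List Int) (x : Nat) : Nat := pvRootF p.length p x
def pvRk (r : List Int) (k : Nat) : Int := r.getD k 0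
-- termination measure: number of vertices of strictly larger rank
def pvM (N : Nat) (r : List Int) (x : Nat) : Nat := ((Finset.range N).filter (fun j => pvRk r x < pvRk r j)).card
def pvEOK (N : Nat) (p : List Int) : Prop := p.length = N ∧ ∀ v ∈ p, 0 ≤ v ∧ v < (N : Int)
def pvROK (N : Nat) (p r : List Int) : Prop := ∀ k, k < N → pvStep p k ≠ k → pvRk r k < pvRk r (pvStep p k)
def pvInv (N : Nat) (p r : List Int) : Prop := pvEOK N p ∧ r.length = N ∧ pvROK N p r
def pvLink (N : Nat) (p lab : List Int) : Prop := ∀ i j, i < N → j < N → (pvRoot p i = pvRoot p j ↔ lab.getD i 0 = lab.getD j 0)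
def pvFull (N : Nat) (p r lab : List Int) : Prop := pvInv N p r ∧ lab.length = N ∧ pvLink N p lab
-- B's loop body, as in the port
def pvBstep (lab : List Int) (e : Int × Int) : List Int :=
  let la := PySem.List.pyGetD lab e.1 0
  let lb := PySem.List.pyGetD lab e.2 0
  if la ≠ lb then lab.map (fun x => if x = lb then la else x) else lab

theorem pvIx_lt {N : Nat} {x : Int} (h1 : -(N : Int) ≤ x) (h2 : x < N) : pvIx N x < N := by
  unfold pvIx; split_ifs with h <;> omega

theorem pvGetD_ix (p : List Int) (x : Int) (d : Int) (h1 : -(p.length : Int) ≤ x) (h2 : x < p.length) :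
    PySem.List.pyGetD p x d = p.getD (pvIx p.length x) d := by
  unfold PySem.List.pyGetD PySem.List.pyGet? PySem.List.pyIdx? pvIx
  split_ifs with h h' h'' <;> simp [List.getD_eq_getElem?_getD] <;> omega

theorem pvSetD_ix (p : List Int) (x : Int) (v : Int) (h1 : -(p.length : Int) ≤ x) (h2 : x < p.length) :
    PySem.List.pySetD p x v = p.set (pvIx p.length x) v := by
  unfold PySem.List.pySetD PySem.List.pySet? PySem.List.pyIdx? pvIx
  split_ifs with h h' h'' <;> simp <;> omega

theorem pvGetD_entry {N : Nat} {p : List Int} (hE : pvEOK N p) {k : Nat} (hk : k < N) :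
    p.getD k 0 = ((pvStep p k : Nat) : Int) := by
  obtain ⟨hlen, hmem⟩ := hE
  have hk' : k < p.length := by omega
  have hv : p.getD k 0 = p[k] := List.getD_eq_getElem p 0 hk'
  have := hmem p[k] (List.getElem_mem hk')
  unfold pvStep
  rw [hv]
  omega

theorem pvStep_lt {N : Nat} {p : List Int} (hE : pvEOK N p) {k : Nat} (hk : k < N) : pvStep p k < N := by
  obtain ⟨hlen, hmem⟩ := hE
  have hk' : k < p.length := by omega
  have hv : p.getD k 0 = p[k] := List.getD_eq_getElem p 0 hk'
  have := hmem p[k] (List.getElem_mem hk')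
  unfold pvStep
  rw [hv]
  omega

theorem pvRootF_fix {p : List Int} {x : Nat} (h : pvStep p x = x) : ∀ f, pvRootF f p x = x := by
  intro f; cases f with
  | zero => rfl
  | succ f => simp [pvRootF, h]

theorem pvM_lt {N : Nat} {r : List Int} {x z : Nat} (hz : z < N) (hlt : pvRk r x < pvRk r z) :
    pvM N r z < pvM N r x := by
  apply Finset.card_lt_card
  constructor
  · intro j hj
    simp only [Finset.mem_filter] at *
    exact ⟨hj.1, lt_trans hlt hj.2⟩
  · intro hsub
    have hzmem : z ∈ (Finset.range N).filter (fun j => pvRk r x < pvRk r j) := by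
      simp only [Finset.mem_filter, Finset.mem_range]; exact ⟨hz, hlt⟩
    have := hsub hzmem
    simp only [Finset.mem_filter] at this
    exact absurd this.2 (lt_irrefl _)

theorem pvM_lt_N {N : Nat} {r : List Int} {x : Nat} (hx : x < N) : pvM N r x < N := by
  have hsub : (Finset.range N).filter (fun j => pvRk r x < pvRk r j) ⊆ (Finset.range N).erase x := by
    intro j hj
    simp only [Finset.mem_filter, Finset.mem_range] at hj
    refine Finset.mem_erase.2 ⟨?_, Finset.mem_range.2 hj.1⟩
    intro he; rw [he] at hj; exact absurd hj.2 (lt_irrefl _)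
  calc pvM N r x ≤ ((Finset.range N).erase x).card := Finset.card_le_card hsub
    _ < N := by
        rw [Finset.card_erase_of_mem (Finset.mem_range.2 hx), Finset.card_range]
        omega

theorem pvRootF_fuel {N : Nat} {p r : List Int} (hI : pvInv N p r) :
    ∀ f1 x f2, x < N → pvM N r x < f1 → f1 ≤ f2 → pvRootF f2 p x = pvRootF f1 p x := by
  intro f1
  induction f1 with
  | zero => intro x f2 _ hM _; omega
  | succ f ih =>
    intro x f2 hx hM hle
    obtain ⟨f2m, rfl⟩ : ∃ k, f2 = k + 1 := ⟨f2 - 1, by omega⟩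
    by_cases hfix : pvStep p x = x
    · rw [pvRootF_fix hfix, pvRootF_fix hfix]
    · simp only [pvRootF, hfix, if_false]
      have hs := hI.2.2 x hx hfix
      have hslt := pvStep_lt hI.1 hx
      have hMlt := pvM_lt (r := r) hslt hs
      by_cases hM0 : pvM N r (pvStep p x) < f
      · rw [ih (pvStep p x) f2m hslt hM0 (by omega)]
      · omega

theorem pvRoot_unfold {N : Nat} {p r : List Int} (hI : pvInv N p r) {x : Nat} (hx : x < N) :
    pvRoot p x = if pvStep p x = x then x else pvRoot p (pvStep p x) := by
  have hlen : p.length = N := hI.1.1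
  by_cases hfix : pvStep p x = x
  · simp [hfix, pvRoot, pvRootF_fix hfix]
  · simp only [hfix, if_false]
    have hMx := pvM_lt_N (r := r) hx
    have hslt := pvStep_lt hI.1 hx
    have hs := hI.2.2 x hx hfix
    have hMlt := pvM_lt (r := r) hslt hs
    unfold pvRoot
    rw [hlen]
    rw [pvRootF_fuel hI (pvM N r x + 1) x N hx (by omega) (by omega)]
    have h1 : pvRootF (pvM N r x + 1) p x = pvRootF (pvM N r x) p (pvStep p x) := by
      simp [pvRootF, hfix]
    rw [h1,
        pvRootF_fuel hI (pvM N r (pvStep p x) + 1) (pvStep p x) (pvM N r x) hslt (by omega) (by omega),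
        pvRootF_fuel hI (pvM N r (pvStep p x) + 1) (pvStep p x) N hslt (by omega) (by omega)]

theorem pvRoot_lt {N : Nat} {p r : List Int} (hI : pvInv N p r) :
    ∀ m x, pvM N r x = m → x < N → pvRoot p x < N := by
  intro m
  induction m using Nat.strong_induction_on with
  | _ m ih =>
    intro x hMx hx
    rw [pvRoot_unfold hI hx]
    by_cases hfix : pvStep p x = x
    · simpa [hfix]
    · simp only [hfix, if_false]
      have hslt := pvStep_lt hI.1 hx
      have hMlt := pvM_lt (r := r) hslt (hI.2.2 x hx hfix)
      exact ih (pvM N r (pvStep p x)) (by omega) _ rfl hslt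

theorem pvRoot_isfix {N : Nat} {p r : List Int} (hI : pvInv N p r) :
    ∀ m x, pvM N r x = m → x < N → pvStep p (pvRoot p x) = pvRoot p x := by
  intro m
  induction m using Nat.strong_induction_on with
  | _ m ih =>
    intro x hMx hx
    rw [pvRoot_unfold hI hx]
    by_cases hfix : pvStep p x = x
    · simpa [hfix]
    · simp only [hfix, if_false]
      have hslt := pvStep_lt hI.1 hx
      have hMlt := pvM_lt (r := r) hslt (hI.2.2 x hx hfix)
      exact ih (pvM N r (pvStep p x)) (by omega) _ rfl hslt

theorem pvRoot_of_fix {p : List Int} {x : Nat} (h : pvStep p x = x) : pvRoot p x = x :=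
  pvRootF_fix h _

theorem pvStep_set_ne {p : List Int} {k x : Nat} (v : Int) (hne : k ≠ x) :
    pvStep (p.set x v) k = pvStep p k := by
  unfold pvStep
  rw [List.getD_eq_getElem?_getD, List.getD_eq_getElem?_getD, List.getElem?_set,
    if_neg (fun h => hne h.symm)]

theorem pvStep_set_self {p : List Int} {x z : Nat} (hx : x < p.length) :
    pvStep (p.set x ((z : Nat) : Int)) x = z := by
  unfold pvStep
  rw [List.getD_eq_getElem?_getD, List.getElem?_set, if_pos rfl, if_pos hx]
  simp

-- step (path compression) lemma
theorem pvComp {N : Nat} {p r : List Int} (hI : pvInv N p r) {x : Nat} (hx : x < N)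
    (hnf : pvStep p x ≠ x) :
    pvInv N (p.set x ((pvStep p (pvStep p x) : Nat) : Int)) r ∧
    (∀ y, y < N → pvRoot (p.set x ((pvStep p (pvStep p x) : Nat) : Int)) y = pvRoot p y) ∧
    pvM N r (pvStep p (pvStep p x)) < pvM N r x ∧
    pvStep p (pvStep p x) < N ∧
    pvRoot p x = pvRoot p (pvStep p (pvStep p x)) := by
  obtain ⟨hE, hrlen, hR⟩ := hI
  have hplen : p.length = N := hE.1
  have hsx : pvStep p x < N := pvStep_lt hE hx
  have hz : pvStep p (pvStep p x) < N := pvStep_lt hE hsx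
  have hrk1 : pvRk r x < pvRk r (pvStep p x) := hR x hx hnf
  have hrkz : pvRk r x < pvRk r (pvStep p (pvStep p x)) := by
    by_cases h2 : pvStep p (pvStep p x) = pvStep p x
    · rw [h2]; exact hrk1
    · exact lt_trans hrk1 (hR (pvStep p x) hsx h2)
  have hzx : pvStep p (pvStep p x) ≠ x := by
    intro h; rw [h] at hrkz; exact absurd hrkz (lt_irrefl _)
  set z := pvStep p (pvStep p x) with hzdef
  set p' := p.set x ((z : Nat) : Int) with hp'
  have hstep' : ∀ k, pvStep p' k = if k = x then z else pvStep p k := by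
    intro k
    by_cases hk : k = x
    · rw [if_pos hk, hk, hp', pvStep_set_self (by omega)]
    · rw [if_neg hk, hp', pvStep_set_ne _ hk]
  have hE' : pvEOK N p' := by
    constructor
    · rw [hp', List.length_set]; exact hplen
    · intro v hv
      rcases List.mem_or_eq_of_mem_set hv with h | h
      · exact hE.2 v h
      · subst h; constructor <;> omega
  have hR' : pvROK N p' r := by
    intro k hk hkf
    rw [hstep'] at *
    by_cases hkx : k = x
    · rw [if_pos hkx] at *
      subst hkx
      exact hrkz
    · rw [if_neg hkx] at *
      exact hR k hk hkf
  have hI' : pvInv N p' r := ⟨hE', hrlen, hR'⟩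
  have hI0 : pvInv N p r := ⟨hE, hrlen, hR⟩
  have hrppx : pvRoot p x = pvRoot p z := by
    rw [pvRoot_unfold hI0 hx, if_neg hnf]
    by_cases h2 : pvStep p (pvStep p x) = pvStep p x
    · rw [hzdef, h2]
    · rw [pvRoot_unfold hI0 hsx, if_neg h2]
  refine ⟨hI', ?_, pvM_lt hz hrkz, hz, hrppx⟩
  -- roots preserved: strong induction on the measure
  have main : ∀ m y, pvM N r y = m → y < N → pvRoot p' y = pvRoot p y := by
    intro m
    induction m using Nat.strong_induction_on with
    | _ m ih =>
      intro y hMy hy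
      by_cases hyx : y = x
      · subst hyx
        rw [pvRoot_unfold hI' hy, hstep', if_pos rfl, if_neg hzx,
          ih (pvM N r z) (by rw [← hMy]; exact pvM_lt hz hrkz) z rfl hz, ← hrppx]
      · by_cases hfix : pvStep p y = y
        · rw [pvRoot_of_fix hfix, pvRoot_of_fix (by rw [hstep', if_neg hyx]; exact hfix)]
        · have hsy : pvStep p y < N := pvStep_lt hE hy
          have hMs : pvM N r (pvStep p y) < m := by
            rw [← hMy]; exact pvM_lt hsy (hR y hy hfix)
          rw [pvRoot_unfold hI' hy, hstep', if_neg hyx, if_neg hfix,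
            pvRoot_unfold hI0 hy, if_neg hfix,
            ih (pvM N r (pvStep p y)) hMs _ rfl hsy]
  exact fun y hy => main (pvM N r y) y rfl hy

-- find specification
theorem pvFind_spec {N : Nat} {r : List Int} :
    ∀ fuel (p : List Int) (x : Int), pvInv N p r → -(N : Int) ≤ x → x < (N : Int) →
    pvM N r (pvIx N x) + 1 < fuel →
    pvInv N (pvFindA fuel p x).1 r ∧
    (∀ y, y < N → pvRoot (pvFindA fuel p x).1 y = pvRoot p y) ∧
    (pvFindA fuel p x).2 = ((pvRoot p (pvIx N x) : Nat) : Int) := by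
  intro fuel
  induction fuel with
  | zero => intro p x _ _ _ hf; omega
  | succ f ih =>
    intro p x hI h1 h2 hf
    have hplen : p.length = N := hI.1.1
    have hix : pvIx N x < N := pvIx_lt h1 h2
    have hget : PySem.List.pyGetD p x 0 = ((pvStep p (pvIx N x) : Nat) : Int) := by
      rw [pvGetD_ix p x 0 (by omega) (by omega), hplen, pvGetD_entry hI.1 hix]
    by_cases hxs : 0 ≤ x
    · have hxeq : ((pvIx N x : Nat) : Int) = x := by unfold pvIx; rw [if_pos hxs]; omega
      by_cases hroot : pvStep p (pvIx N x) = pvIx N x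
      · -- found the root immediately
        have hgx : PySem.List.pyGetD p x 0 = x := by rw [hget, hroot, hxeq]
        have hstep1 : pvFindA (f+1) p x = (p, x) := by
          simp only [pvFindA]; rw [if_pos hgx]
        rw [hstep1]
        exact ⟨hI, fun y _ => rfl, by rw [pvRoot_of_fix hroot, hxeq]⟩
      · -- one compression step, then recurse
        have hne : PySem.List.pyGetD p x 0 ≠ x := by
          rw [hget, ← hxeq]; intro h; exact hroot (by exact_mod_cast h)
        obtain ⟨hI', hpres, hMlt, hzlt, hreq⟩ := pvComp hI hix hroot
        have hget2 : PySem.List.pyGetD p (PySem.List.pyGetD p x 0) 0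
            = ((pvStep p (pvStep p (pvIx N x)) : Nat) : Int) := by
          rw [hget, PySem.List.pyGetD_natCast, pvGetD_entry hI.1 (pvStep_lt hI.1 hix)]
        have hset : PySem.List.pySetD p x ((pvStep p (pvStep p (pvIx N x)) : Nat) : Int)
            = p.set (pvIx N x) ((pvStep p (pvStep p (pvIx N x)) : Nat) : Int) := by
          rw [pvSetD_ix p x _ (by omega) (by omega), hplen]
        have hstep1 : pvFindA (f+1) p x
            = pvFindA f (p.set (pvIx N x) ((pvStep p (pvStep p (pvIx N x)) : Nat) : Int))
                ((pvStep p (pvStep p (pvIx N x)) : Nat) : Int) := by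
          simp only [pvFindA]; rw [if_neg hne, hget2, hset]
        have hzix : pvIx N ((pvStep p (pvStep p (pvIx N x)) : Nat) : Int)
            = pvStep p (pvStep p (pvIx N x)) := by
          unfold pvIx; rw [if_pos (by positivity)]; simp
        have hih := ih (p.set (pvIx N x) ((pvStep p (pvStep p (pvIx N x)) : Nat) : Int))
          ((pvStep p (pvStep p (pvIx N x)) : Nat) : Int) hI' (by omega) (by exact_mod_cast hzlt)
          (by rw [hzix]; omega)
        rw [hzix] at hih
        obtain ⟨hIf, hpresf, hvalf⟩ := hih
        rw [hstep1]
        refine ⟨hIf, ?_, ?_⟩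
        · intro y hy; rw [hpresf y hy, hpres y hy]
        · rw [hvalf, hpres _ hzlt, ← hreq]
    · -- negative x: the first read wraps; parent[x] ≥ 0 > x so the loop body runs once
      push_neg at hxs
      have hne : PySem.List.pyGetD p x 0 ≠ x := by rw [hget]; omega
      by_cases hroot : pvStep p (pvIx N x) = pvIx N x
      · -- x's wrapped index is already a root: the write is a no-op
        have hgx : PySem.List.pyGetD p x 0 = ((pvIx N x : Nat) : Int) := by rw [hget, hroot]
        have hgetix : PySem.List.pyGetD p ((pvIx N x : Nat) : Int) 0 = ((pvIx N x : Nat) : Int) := by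
          rw [PySem.List.pyGetD_natCast, pvGetD_entry hI.1 hix, hroot]
        have hself : p.set (pvIx N x) ((pvIx N x : Nat) : Int) = p := by
          have hlt : pvIx N x < p.length := by omega
          have hval : ((pvIx N x : Nat) : Int) = p[pvIx N x] := by
            have h0 := pvGetD_entry hI.1 hix
            rw [List.getD_eq_getElem p 0 hlt] at h0
            rw [h0, hroot]
          rw [hval, List.set_getElem_self]
        have hset : PySem.List.pySetD p x ((pvIx N x : Nat) : Int) = p := by
          rw [pvSetD_ix p x _ (by omega) (by omega), hplen, hself]
        obtain ⟨g, rfl⟩ : ∃ g, f = g + 1 := ⟨f - 1, by omega⟩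
        have hstep1 : pvFindA (g+1+1) p x = pvFindA (g+1) p ((pvIx N x : Nat) : Int) := by
          simp only [pvFindA]; rw [if_neg hne, hgx, hgetix, hset]; simp [hgetix]
        have hstep2 : pvFindA (g+1) p ((pvIx N x : Nat) : Int) = (p, ((pvIx N x : Nat) : Int)) := by
          simp [pvFindA, hgetix]
        rw [hstep1, hstep2]
        exact ⟨hI, fun y _ => rfl, by rw [pvRoot_of_fix hroot]⟩
      · -- wrapped index is not a root: exactly the nonnegative else-branch
        obtain ⟨hI', hpres, hMlt, hzlt, hreq⟩ := pvComp hI hix hroot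
        have hget2 : PySem.List.pyGetD p (PySem.List.pyGetD p x 0) 0
            = ((pvStep p (pvStep p (pvIx N x)) : Nat) : Int) := by
          rw [hget, PySem.List.pyGetD_natCast, pvGetD_entry hI.1 (pvStep_lt hI.1 hix)]
        have hset : PySem.List.pySetD p x ((pvStep p (pvStep p (pvIx N x)) : Nat) : Int)
            = p.set (pvIx N x) ((pvStep p (pvStep p (pvIx N x)) : Nat) : Int) := by
          rw [pvSetD_ix p x _ (by omega) (by omega), hplen]
        have hstep1 : pvFindA (f+1) p x
            = pvFindA f (p.set (pvIx N x) ((pvStep p (pvStep p (pvIx N x)) : Nat) : Int))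
                ((pvStep p (pvStep p (pvIx N x)) : Nat) : Int) := by
          simp only [pvFindA]; rw [if_neg hne, hget2, hset]
        have hzix : pvIx N ((pvStep p (pvStep p (pvIx N x)) : Nat) : Int)
            = pvStep p (pvStep p (pvIx N x)) := by
          unfold pvIx; rw [if_pos (by positivity)]; simp
        have hih := ih (p.set (pvIx N x) ((pvStep p (pvStep p (pvIx N x)) : Nat) : Int))
          ((pvStep p (pvStep p (pvIx N x)) : Nat) : Int) hI' (by omega) (by exact_mod_cast hzlt)
          (by rw [hzix]; omega)
        rw [hzix] at hih
        obtain ⟨hIf, hpresf, hvalf⟩ := hih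
        rw [hstep1]
        refine ⟨hIf, ?_, ?_⟩
        · intro y hy; rw [hpresf y hy, hpres y hy]
        · rw [hvalf, hpres _ hzlt, ← hreq]

-- linking lemma: setting a root c to point to another root d merges the two classes
theorem pvLinkRoot {N : Nat} {p r r'' : List Int} (hI : pvInv N p r)
    {c d : Nat} (hc : c < N) (hd : d < N) (hcr : pvStep p c = c) (hdr : pvStep p d = d)
    (hne : c ≠ d) (hI'' : pvInv N (p.set c ((d : Nat) : Int)) r'') :
    ∀ m y, pvM N r'' y = m → y < N →
      pvRoot (p.set c ((d : Nat) : Int)) y = if pvRoot p y = c then d else pvRoot p y := by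
  have hplen : p.length = N := hI.1.1
  have hstep' : ∀ k, pvStep (p.set c ((d : Nat) : Int)) k = if k = c then d else pvStep p k := by
    intro k
    by_cases hk : k = c
    · rw [if_pos hk, hk, pvStep_set_self (by omega)]
    · rw [if_neg hk, pvStep_set_ne _ hk]
  intro m
  induction m using Nat.strong_induction_on with
  | _ m ih =>
    intro y hMy hy
    by_cases hyc : y = c
    · subst hyc
      have h1 : pvStep (p.set y ((d : Nat) : Int)) y = d := by rw [hstep', if_pos rfl]
      have h2 : pvStep (p.set y ((d : Nat) : Int)) d = d := by
        rw [hstep', if_neg (fun h => hne h.symm)]; exact hdr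
      rw [pvRoot_unfold hI'' hy, h1, if_neg (fun h => hne h.symm), pvRoot_of_fix h2,
        pvRoot_of_fix hcr, if_pos rfl]
    · by_cases hfix : pvStep p y = y
      · rw [pvRoot_of_fix (by rw [hstep', if_neg hyc]; exact hfix), pvRoot_of_fix hfix,
          if_neg hyc]
      · have hsy : pvStep p y < N := pvStep_lt hI.1 hy
        have hfix' : pvStep (p.set c ((d : Nat) : Int)) y ≠ y := by
          rw [hstep', if_neg hyc]; exact hfix
        have hMs : pvM N r'' (pvStep p y) < m := by
          rw [← hMy]
          have := hI''.2.2 y hy hfix'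
          rw [hstep', if_neg hyc] at this
          exact pvM_lt hsy this
        rw [pvRoot_unfold hI'' hy, hstep', if_neg hyc, if_neg hfix,
          ih (pvM N r'' (pvStep p y)) hMs _ rfl hsy,
          pvRoot_unfold hI hy, if_neg hfix]

theorem pvRk_set {r : List Int} {k j : Nat} {v : Int} (hk : k < r.length) :
    pvRk (r.set k v) j = if j = k then v else pvRk r j := by
  unfold pvRk
  rw [List.getD_eq_getElem?_getD, List.getD_eq_getElem?_getD, List.getElem?_set]
  by_cases h : j = k
  · rw [if_pos h, if_pos h.symm, if_pos (h ▸ hk)]; rfl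
  · rw [if_neg h, if_neg (fun hh => h hh.symm)]

-- linking a root c of strictly smaller rank under a root d preserves the invariant
theorem pvLinkInv {N : Nat} {p r : List Int} (hI : pvInv N p r) {c d : Nat}
    (hc : c < N) (hd : d < N) (hcr : pvStep p c = c) (hne : c ≠ d)
    (hrk : pvRk r c < pvRk r d) : pvInv N (p.set c ((d : Nat) : Int)) r := by
  obtain ⟨hE, hrlen, hR⟩ := hI
  have hplen : p.length = N := hE.1
  have hstep' : ∀ k, pvStep (p.set c ((d : Nat) : Int)) k = if k = c then d else pvStep p k := by
    intro k
    by_cases hk : k = c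
    · rw [if_pos hk, hk, pvStep_set_self (by omega)]
    · rw [if_neg hk, pvStep_set_ne _ hk]
  refine ⟨⟨by rw [List.length_set]; exact hE.1, ?_⟩, hrlen, ?_⟩
  · intro v hv
    rcases List.mem_or_eq_of_mem_set hv with h | h
    · exact hE.2 v h
    · subst h; constructor <;> omega
  · intro k hk hkf
    rw [hstep'] at *
    by_cases hkc : k = c
    · rw [if_pos hkc] at *; subst hkc; exact hrk
    · rw [if_neg hkc] at *; exact hR k hk hkf

-- linking a root c under an equal-rank root d, whose rank is then incremented
theorem pvLinkInvEq {N : Nat} {p r : List Int} (hI : pvInv N p r) {c d : Nat}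
    (hc : c < N) (hd : d < N) (hcr : pvStep p c = c) (hdr : pvStep p d = d) (hne : c ≠ d)
    (hrk : pvRk r c = pvRk r d) :
    pvInv N (p.set c ((d : Nat) : Int)) (r.set d (pvRk r d + 1)) := by
  obtain ⟨hE, hrlen, hR⟩ := hI
  have hplen : p.length = N := hE.1
  have hdlen : d < r.length := by omega
  have hstep' : ∀ k, pvStep (p.set c ((d : Nat) : Int)) k = if k = c then d else pvStep p k := by
    intro k
    by_cases hk : k = c
    · rw [if_pos hk, hk, pvStep_set_self (by omega)]
    · rw [if_neg hk, pvStep_set_ne _ hk]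
  refine ⟨⟨by rw [List.length_set]; exact hE.1, ?_⟩, by rw [List.length_set]; exact hrlen, ?_⟩
  · intro v hv
    rcases List.mem_or_eq_of_mem_set hv with h | h
    · exact hE.2 v h
    · subst h; constructor <;> omega
  · intro k hk hkf
    rw [hstep'] at *
    by_cases hkc : k = c
    · rw [if_pos hkc] at *
      subst hkc
      rw [pvRk_set hdlen, pvRk_set hdlen, if_neg hne, if_pos rfl]
      omega
    · rw [if_neg hkc] at *
      have hbase := hR k hk hkf
      have hkd : k ≠ d := by intro h; rw [h, hdr] at hkf; exact hkf rfl
      rw [pvRk_set hdlen, pvRk_set hdlen, if_neg hkd]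
      by_cases hsd : pvStep p k = d
      · rw [if_pos hsd]
        rw [hsd] at hbase
        omega
      · rw [if_neg hsd]; exact hbase

theorem pvMapGetD {lab : List Int} (f : Int → Int) {i : Nat} (hi : i < lab.length) :
    (lab.map f).getD i 0 = f (lab.getD i 0) := by
  have h1 : i < (lab.map f).length := by rw [List.length_map]; exact hi
  rw [List.getD_eq_getElem _ _ h1, List.getD_eq_getElem _ _ hi, List.getElem_map]

-- merging the classes of ra and rb on the A side matches relabelling lb to la on the B side
theorem pvMergeLink {N : Nat} {p p₃ lab lab' : List Int} {ra rb c dd : Nat} {la lb : Int}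
    (hLink : pvLink N p lab)
    (hchar : ∀ y, y < N → pvRoot p₃ y = if pvRoot p y = c then dd else pvRoot p y)
    (hlab' : ∀ i, i < N → lab'.getD i 0 = if lab.getD i 0 = lb then la else lab.getD i 0)
    (hca : (c = ra ∧ dd = rb) ∨ (c = rb ∧ dd = ra))
    (hra : ∀ i, i < N → (pvRoot p i = ra ↔ lab.getD i 0 = la))
    (hrb : ∀ i, i < N → (pvRoot p i = rb ↔ lab.getD i 0 = lb))
    (hab : ra ≠ rb) (hlalb : la ≠ lb) :
    pvLink N p₃ lab' := by
  intro i j hi hj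
  rw [hchar i hi, hchar j hj, hlab' i hi, hlab' j hj]
  have hBase := hLink i j hi hj
  have hrai := hra i hi
  have hraj := hra j hj
  have hrbi := hrb i hi
  have hrbj := hrb j hj
  have hL : ((if pvRoot p i = c then dd else pvRoot p i)
        = (if pvRoot p j = c then dd else pvRoot p j))
      ↔ (pvRoot p i = pvRoot p j ∨
          ((pvRoot p i = ra ∨ pvRoot p i = rb) ∧ (pvRoot p j = ra ∨ pvRoot p j = rb))) := by
    rcases hca with ⟨h1, h2⟩ | ⟨h1, h2⟩ <;> subst h1 <;> subst h2 <;> split_ifs <;> omega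
  have hR : ((if lab.getD i 0 = lb then la else lab.getD i 0)
        = (if lab.getD j 0 = lb then la else lab.getD j 0))
      ↔ (lab.getD i 0 = lab.getD j 0 ∨
          ((lab.getD i 0 = la ∨ lab.getD i 0 = lb) ∧ (lab.getD j 0 = la ∨ lab.getD j 0 = lb))) := by
    split_ifs <;> omega
  rw [hL, hR]
  constructor
  · rintro (h | ⟨h1, h2⟩)
    · exact Or.inl (hBase.1 h)
    · exact Or.inr ⟨h1.imp hrai.1 hrbi.1, h2.imp hraj.1 hrbj.1⟩
  · rintro (h | ⟨h1, h2⟩)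
    · exact Or.inl (hBase.2 h)
    · exact Or.inr ⟨h1.imp hrai.2 hrbi.2, h2.imp hraj.2 hrbj.2⟩

-- one union step preserves the full invariant
theorem pvUnion_spec {N : Nat} {p r lab : List Int} (hF : pvFull N p r lab)
    {a b : Int} (ha1 : -(N : Int) ≤ a) (ha2 : a < (N : Int)) (hb1 : -(N : Int) ≤ b) (hb2 : b < (N : Int)) :
    pvFull N (pvUnionA p r a b).1 (pvUnionA p r a b).2 (pvBstep lab (a, b)) := by
  obtain ⟨hI, hlabl, hLink⟩ := hF
  have hplen : p.length = N := hI.1.1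
  have hrlen : r.length = N := hI.2.1
  have hia : pvIx N a < N := pvIx_lt ha1 ha2
  have hib : pvIx N b < N := pvIx_lt hb1 hb2
  obtain ⟨hI1, hpres1, hval1⟩ := pvFind_spec (p.length + 1) p a hI ha1 ha2
    (by rw [hplen]; have := pvM_lt_N (N := N) (r := r) (x := pvIx N a) hia; omega)
  set p1 := (pvFindA (p.length + 1) p a).1 with hp1
  have hp1len : p1.length = N := hI1.1.1
  obtain ⟨hI2, hpres2, hval2⟩ := pvFind_spec (p1.length + 1) p1 b hI1 hb1 hb2
    (by rw [hp1len]; have := pvM_lt_N (N := N) (r := r) (x := pvIx N b) hib; omega)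
  set p2 := (pvFindA (p1.length + 1) p1 b).1 with hp2
  set ra := pvRoot p (pvIx N a) with hradef
  set rb := pvRoot p1 (pvIx N b) with hrbdef
  have hrb' : rb = pvRoot p (pvIx N b) := hpres1 _ hib
  have hpres : ∀ y, y < N → pvRoot p2 y = pvRoot p y := fun y hy => by
    rw [hpres2 y hy, hpres1 y hy]
  have hralt : ra < N := pvRoot_lt hI _ _ rfl hia
  have hrblt : rb < N := by rw [hrb']; exact pvRoot_lt hI _ _ rfl hib
  have hfixa : pvStep p2 ra = ra := by
    have h0 : pvRoot p2 (pvIx N a) = ra := by rw [hpres _ hia]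
    rw [← h0]; exact pvRoot_isfix hI2 _ _ rfl hia
  have hfixb : pvStep p2 rb = rb := by
    have h0 : pvRoot p2 (pvIx N b) = rb := by rw [hpres2 _ hib]
    rw [← h0]; exact pvRoot_isfix hI2 _ _ rfl hib
  have hlaba : PySem.List.pyGetD lab a 0 = lab.getD (pvIx N a) 0 := by
    rw [pvGetD_ix lab a 0 (by omega) (by omega), hlabl]
  have hlabb : PySem.List.pyGetD lab b 0 = lab.getD (pvIx N b) 0 := by
    rw [pvGetD_ix lab b 0 (by omega) (by omega), hlabl]
  set la := lab.getD (pvIx N a) 0 with hladef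
  set lb := lab.getD (pvIx N b) 0 with hlbdef
  have hlaiff : ∀ i, i < N → (pvRoot p i = ra ↔ lab.getD i 0 = la) := fun i hi =>
    hLink i (pvIx N a) hi hia
  have hlbiff : ∀ i, i < N → (pvRoot p i = rb ↔ lab.getD i 0 = lb) := fun i hi => by
    rw [hrb']; exact hLink i (pvIx N b) hi hib
  have hun : pvUnionA p r a b =
      (if ((ra : Nat) : Int) = ((rb : Nat) : Int) then (p2, r)
       else if pvRk r ra < pvRk r rb then (p2.set ra ((rb : Nat) : Int), r)
       else if pvRk r rb < pvRk r ra then (p2.set rb ((ra : Nat) : Int), r)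
       else (p2.set rb ((ra : Nat) : Int), r.set ra (pvRk r ra + 1))) := by
    simp only [pvUnionA, ← hp1, ← hp2, hval1, hval2, ← hradef, ← hrbdef,
      PySem.List.pyGetD_natCast, PySem.List.pySetD_natCast]
    rfl
  by_cases hcase : ra = rb
  · -- same root: both sides do nothing
    have hlalb : la = lb := (hlaiff (pvIx N a) hia).1 rfl |>.symm.trans
      (((hlbiff (pvIx N a) hia).1 (by rw [← hcase])).symm).symm
    have hB : pvBstep lab (a, b) = lab := by
      simp only [pvBstep, hlaba, hlabb, ← hladef, ← hlbdef, hlalb]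
      simp
    rw [hun, if_pos (by exact_mod_cast hcase), hB]
    refine ⟨hI2, hlabl, fun i j hi hj => ?_⟩
    rw [hpres i hi, hpres j hj]
    exact hLink i j hi hj
  · have hlalb : la ≠ lb := fun h =>
      hcase ((hlaiff (pvIx N a) hia).2 (h ▸ ((hlaiff (pvIx N a) hia).1 rfl)) ▸
        ((hlbiff (pvIx N a) hia).2 (by rw [← h])))
    have hB : pvBstep lab (a, b) = lab.map (fun x => if x = lb then la else x) := by
      simp only [pvBstep, hlaba, hlabb, ← hladef, ← hlbdef]
      simp [hlalb]
    have hlab'len : (lab.map (fun x => if x = lb then la else x)).length = N := by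
      rw [List.length_map]; exact hlabl
    have hlab' : ∀ i, i < N →
        (lab.map (fun x => if x = lb then la else x)).getD i 0
          = if lab.getD i 0 = lb then la else lab.getD i 0 := fun i hi =>
      pvMapGetD _ (by omega)
    have hI2' : pvInv N p2 r := hI2
    rw [hun, if_neg (by exact_mod_cast hcase), hB]
    by_cases hrk1 : pvRk r ra < pvRk r rb
    · -- parent[ra] = rb
      rw [if_pos hrk1]
      have hI3 : pvInv N (p2.set ra ((rb : Nat) : Int)) r :=
        pvLinkInv hI2' hralt hrblt hfixa hcase hrk1
      have hchar : ∀ y, y < N → pvRoot (p2.set ra ((rb : Nat) : Int)) y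
          = if pvRoot p y = ra then rb else pvRoot p y := by
        intro y hy
        rw [pvLinkRoot hI2' hralt hrblt hfixa hfixb hcase hI3 _ y rfl hy, hpres y hy]
      exact ⟨hI3, hlab'len,
        pvMergeLink hLink hchar hlab' (Or.inl ⟨rfl, rfl⟩) hlaiff hlbiff hcase hlalb⟩
    · rw [if_neg hrk1]
      by_cases hrk2 : pvRk r rb < pvRk r ra
      · -- parent[rb] = ra
        rw [if_pos hrk2]
        have hI3 : pvInv N (p2.set rb ((ra : Nat) : Int)) r :=
          pvLinkInv hI2' hrblt hralt hfixb (fun h => hcase h.symm) hrk2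
        have hchar : ∀ y, y < N → pvRoot (p2.set rb ((ra : Nat) : Int)) y
            = if pvRoot p y = rb then ra else pvRoot p y := by
          intro y hy
          rw [pvLinkRoot hI2' hrblt hralt hfixb hfixa (fun h => hcase h.symm) hI3 _ y rfl hy,
            hpres y hy]
        exact ⟨hI3, hlab'len,
          pvMergeLink hLink hchar hlab' (Or.inr ⟨rfl, rfl⟩) hlaiff hlbiff hcase hlalb⟩
      · -- equal ranks: parent[rb] = ra; rank[ra] += 1
        rw [if_neg hrk2]
        have hrkeq : pvRk r rb = pvRk r ra := by omega
        have hI3 : pvInv N (p2.set rb ((ra : Nat) : Int)) (r.set ra (pvRk r ra + 1)) :=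
          pvLinkInvEq hI2' hrblt hralt hfixb hfixa (fun h => hcase h.symm) hrkeq
        have hchar : ∀ y, y < N → pvRoot (p2.set rb ((ra : Nat) : Int)) y
            = if pvRoot p y = rb then ra else pvRoot p y := by
          intro y hy
          rw [pvLinkRoot hI2' hrblt hralt hfixb hfixa (fun h => hcase h.symm) hI3 _ y rfl hy,
            hpres y hy]
        exact ⟨hI3, hlab'len,
          pvMergeLink hLink hchar hlab' (Or.inr ⟨rfl, rfl⟩) hlaiff hlbiff hcase hlalb⟩

-- the edge loop preserves the full invariant (both sides at once)
theorem pvFold_spec {N : Nat} :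
    ∀ (edges : List (Int × Int)) (p r lab : List Int), pvFull N p r lab →
    (∀ e ∈ edges, (-(N : Int) ≤ e.1 ∧ e.1 < (N : Int)) ∧ (-(N : Int) ≤ e.2 ∧ e.2 < (N : Int))) →
    pvFull N
      (edges.foldl (fun st e => pvUnionA st.1 st.2 e.1 e.2) (p, r)).1
      (edges.foldl (fun st e => pvUnionA st.1 st.2 e.1 e.2) (p, r)).2
      (edges.foldl pvBstep lab) := by
  intro edges
  induction edges with
  | nil => intro p r lab hF _; simpa using hF
  | cons e rest ih =>
    intro p r lab hF hPre
    have he := hPre e (by simp)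
    have h1 := pvUnion_spec hF he.1.1 he.1.2 he.2.1 he.2.2
    simpa using ih _ _ _ h1 (fun e' h' => hPre e' (by simp [h']))

-- the final set-comprehension fold collects exactly the roots
theorem pvScan_spec {N : Nat} {r : List Int} :
    ∀ (k : Nat) (p : List Int) (s : PySem.Set Int), pvInv N p r → k ≤ N →
    (((List.range k).map (fun i => ((i : Nat) : Int))).foldl
      (fun (acc : List Int × PySem.Set Int) i =>
        ((pvFindA (acc.1.length + 1) acc.1 i).1,
          PySem.Set.add acc.2 (pvFindA (acc.1.length + 1) acc.1 i).2)) (p, s)).2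
      = PySem.Set.update s ((List.range k).map (fun i => ((pvRoot p i : Nat) : Int))) ∧
    pvInv N (((List.range k).map (fun i => ((i : Nat) : Int))).foldl
      (fun (acc : List Int × PySem.Set Int) i =>
        ((pvFindA (acc.1.length + 1) acc.1 i).1,
          PySem.Set.add acc.2 (pvFindA (acc.1.length + 1) acc.1 i).2)) (p, s)).1 r ∧
    (∀ y, y < N → pvRoot (((List.range k).map (fun i => ((i : Nat) : Int))).foldl
      (fun (acc : List Int × PySem.Set Int) i =>
        ((pvFindA (acc.1.length + 1) acc.1 i).1,
          PySem.Set.add acc.2 (pvFindA (acc.1.length + 1) acc.1 i).2)) (p, s)).1 y = pvRoot p y) := by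
  intro k
  induction k with
  | zero =>
    intro p s hI _
    exact ⟨rfl, hI, fun y _ => rfl⟩
  | succ k ih =>
    intro p s hI hk1
    have hkN : k < N := by omega
    rw [List.range_succ, List.map_append, List.map_singleton, List.foldl_append]
    obtain ⟨hs, hI2, hpres⟩ := ih p s hI (by omega)
    set F := ((List.range k).map (fun i => ((i : Nat) : Int))).foldl
      (fun (acc : List Int × PySem.Set Int) i =>
        ((pvFindA (acc.1.length + 1) acc.1 i).1,
          PySem.Set.add acc.2 (pvFindA (acc.1.length + 1) acc.1 i).2)) (p, s) with hF
    have hFlen : F.1.length = N := hI2.1.1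
    have hixk : pvIx N ((k : Nat) : Int) = k := by unfold pvIx; rw [if_pos (by positivity)]; simp
    obtain ⟨hIf, hpresf, hvalf⟩ := pvFind_spec (F.1.length + 1) F.1 ((k : Nat) : Int) hI2
      (by omega) (by exact_mod_cast hkN)
      (by rw [hFlen, hixk]; have := pvM_lt_N (N := N) (r := r) (x := k) hkN; omega)
    rw [hixk] at hvalf
    simp only [List.foldl_cons, List.foldl_nil]
    refine ⟨?_, hIf, fun y hy => by rw [hpresf y hy, hpres y hy]⟩
    rw [hvalf, hs, hpres k hkN, List.map_append, List.map_singleton]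
    simp [PySem.Set.update]

-- two equal-length lists inducing the same partition of positions have equally many distinct values
theorem pvCount_eq : ∀ (xs ys : List Int), xs.length = ys.length →
    (∀ i j, i < xs.length → j < xs.length → (xs.getD i 0 = xs.getD j 0 ↔ ys.getD i 0 = ys.getD j 0)) →
    (PySem.Set.ofList xs).length = (PySem.Set.ofList ys).length := by
  have memLast : ∀ (us vs : List Int) (u v : Int), us.length = vs.length →
      (∀ i j, i < us.length + 1 → j < us.length + 1 →
        ((us ++ [u]).getD i 0 = (us ++ [u]).getD j 0 ↔ (vs ++ [v]).getD i 0 = (vs ++ [v]).getD j 0)) →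
      u ∈ us → v ∈ vs := by
    intro us vs u v hlen hfib hu
    obtain ⟨i, hi, hui⟩ := List.mem_iff_getElem.1 hu
    have h1 : (us ++ [u]).getD i 0 = (us ++ [u]).getD us.length 0 := by
      rw [List.getD_append _ _ _ i hi, List.getD_eq_getElem _ _ hi, hui,
        List.getD_eq_getElem?_getD, List.getElem?_concat_length]
      rfl
    have h2 := (hfib i us.length (by omega) (by omega)).1 h1
    rw [List.getD_append _ _ _ i (by omega), hlen, List.getD_eq_getElem?_getD (l := vs ++ [v]),
      List.getElem?_concat_length] at h2
    rw [List.getD_eq_getElem _ _ (by omega : i < vs.length)] at h2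
    simp only [Option.getD_some] at h2
    exact h2 ▸ List.getElem_mem _
  intro xs
  induction xs using List.reverseRecOn with
  | nil =>
    intro ys hlen _
    rw [List.length_nil] at hlen
    rw [List.eq_nil_of_length_eq_zero hlen.symm]
  | append_singleton xs' x ih =>
    intro ys hlen hfib
    have hys : ys ≠ [] := by
      intro h; subst h; simp at hlen
    have hdec : ys.dropLast ++ [ys.getLast hys] = ys := List.dropLast_append_getLast hys
    rw [← hdec] at hlen hfib ⊢
    set ys' := ys.dropLast with hys'
    set y := ys.getLast hys with hy
    simp only [List.length_append, List.length_singleton] at hlen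
    have hlen' : xs'.length = ys'.length := by omega
    have hfib' : ∀ i j, i < xs'.length → j < xs'.length →
        (xs'.getD i 0 = xs'.getD j 0 ↔ ys'.getD i 0 = ys'.getD j 0) := by
      intro i j hi hj
      have := hfib i j (by simp; omega) (by simp; omega)
      rwa [List.getD_append _ _ _ i hi, List.getD_append _ _ _ j hj,
        List.getD_append _ _ _ i (by omega), List.getD_append _ _ _ j (by omega)] at this
    have hIH := ih ys' hlen' hfib'
    rw [PySem.Set.ofList_append_singleton, PySem.Set.ofList_append_singleton]
    have hfib2 : ∀ i j, i < xs'.length + 1 → j < xs'.length + 1 →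
        ((xs' ++ [x]).getD i 0 = (xs' ++ [x]).getD j 0 ↔ (ys' ++ [y]).getD i 0 = (ys' ++ [y]).getD j 0) := by
      intro i j hi hj
      exact hfib i j (by simp; omega) (by simp; omega)
    have hfib2' : ∀ i j, i < ys'.length + 1 → j < ys'.length + 1 →
        ((ys' ++ [y]).getD i 0 = (ys' ++ [y]).getD j 0 ↔ (xs' ++ [x]).getD i 0 = (xs' ++ [x]).getD j 0) := by
      intro i j hi hj
      exact (hfib2 i j (by omega) (by omega)).symm
    have hmem : x ∈ xs' ↔ y ∈ ys' :=
      ⟨memLast xs' ys' x y hlen' hfib2, memLast ys' xs' y x hlen'.symm hfib2'⟩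
    by_cases hx : x ∈ xs'
    · rw [PySem.Set.add_of_mem ((PySem.Set.mem_ofList xs' x).2 hx),
        PySem.Set.add_of_mem ((PySem.Set.mem_ofList ys' y).2 (hmem.1 hx))]
      exact hIH
    · rw [PySem.Set.add_of_not_mem (fun h => hx ((PySem.Set.mem_ofList xs' x).1 h)),
        PySem.Set.add_of_not_mem (fun h => (hmem.not.1 hx) ((PySem.Set.mem_ofList ys' y).1 h)),
        List.length_append, List.length_append, hIH]
      simp

-- ===== VERDICT (by name: the statement is the Claim_ definition above) =====
theorem graph_betti_from_edges_py_spec : Claim_equal_graph_betti_from_edges_py := by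
  unfold Claim_equal_graph_betti_from_edges_py
  intro n edges hDom hPre
  unfold Spec_graph_betti_from_edges_py
  by_cases hn : n ≤ 0
  · -- no vertices: Pre_ forces edges = [] and both programs return (0, -n)
    have hedges : edges = [] := by
      cases edges with
      | nil => rfl
      | cons e t =>
        exfalso
        have := hPre e (List.mem_cons_self)
        omega
    subst hedges
    simp [graph_betti_from_edges_py, graph_betti_from_edges_py_alt,
      PySem.List.pyRange_one_eq_nil hn, PySem.Set.len, PySem.List.len, PySem.Set.empty,
      PySem.Set.ofList]
  · push_neg at hn
    set N := n.toNat with hNdef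
    have hnN : n = ((N : Nat) : Int) := by omega
    have hp0 : PySem.List.pyRange 0 n 1 = (List.range N).map (fun k => ((k : Nat) : Int)) := by
      rw [PySem.List.pyRange_one]
      simp only [Int.sub_zero]
      rw [← hNdef]
      simp
    have hr0 : PySem.List.pyRepeat [(0 : Int)] n = List.replicate N (0 : Int) :=
      PySem.List.pyRepeat_singleton 0 n
    rw [hnN] at hp0 hr0
    set p0 := (List.range N).map (fun k => ((k : Nat) : Int)) with hp0def
    have hp0len : p0.length = N := by simp [hp0def]
    have hp0get : ∀ i, i < N → p0.getD i 0 = ((i : Nat) : Int) := fun i hi =>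
      PySem.List.getD_map_range _ _ _ _ hi
    have hstep0 : ∀ i, i < N → pvStep p0 i = i := fun i hi => by
      unfold pvStep; rw [hp0get i hi]; simp
    have hroot0 : ∀ i, i < N → pvRoot p0 i = i := fun i hi => pvRoot_of_fix (hstep0 i hi)
    have hIp0 : pvInv N p0 (List.replicate N (0 : Int)) := by
      refine ⟨⟨hp0len, ?_⟩, by simp, ?_⟩
      · intro v hv
        simp only [hp0def, List.mem_map, List.mem_range] at hv
        obtain ⟨k, hk, rfl⟩ := hv
        constructor <;> omega
      · intro k hk hkf
        exact absurd (hstep0 k hk) hkf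
    have hFull0 : pvFull N p0 (List.replicate N (0 : Int)) p0 := by
      refine ⟨hIp0, hp0len, fun i j hi hj => ?_⟩
      rw [hroot0 i hi, hroot0 j hj, hp0get i hi, hp0get j hj]
      exact Iff.symm Int.natCast_inj
    have hPre' : ∀ e ∈ edges,
        (-(N : Int) ≤ e.1 ∧ e.1 < (N : Int)) ∧ (-(N : Int) ≤ e.2 ∧ e.2 < (N : Int)) := by
      intro e he
      have := hPre e he
      omega
    obtain ⟨hIP, hLlen, hLinkP⟩ :=
      pvFold_spec edges p0 (List.replicate N (0 : Int)) p0 hFull0 hPre'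
    set stA := edges.foldl (fun st e => pvUnionA st.1 st.2 e.1 e.2)
      (p0, List.replicate N (0 : Int)) with hstA
    set L := edges.foldl pvBstep p0 with hL
    obtain ⟨hscan, _, _⟩ := pvScan_spec (N := N) (r := stA.2) N stA.1 PySem.Set.empty hIP (le_refl N)
    have hBfun : (fun (lab : List Int) (e : Int × Int) =>
        let la := PySem.List.pyGetD lab e.1 0
        let lb := PySem.List.pyGetD lab e.2 0
        if la ≠ lb then lab.map (fun x => if x = lb then la else x) else lab) = pvBstep := rfl
    have hc : (PySem.Set.ofList ((List.range N).map (fun i => ((pvRoot stA.1 i : Nat) : Int)))).length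
        = (PySem.Set.ofList L).length := by
      apply pvCount_eq
      · simp [hLlen]
      · intro i j hi hj
        simp only [List.length_map, List.length_range] at hi hj
        rw [PySem.List.getD_map_range _ _ _ _ hi, PySem.List.getD_map_range _ _ _ _ hj]
        rw [Int.natCast_inj]
        exact hLinkP i j hi hj
    simp only [graph_betti_from_edges_py, graph_betti_from_edges_py_alt, hBfun, hp0, hr0,
      ← hstA, ← hL, hnN, PySem.Set.len]
    rw [hp0def, hscan, PySem.Set.update_empty, hc]
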